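-- pv_equiv track=rewrite | github.com/aistairc/DeepEventMine | eval/evalNER.py | count
-- ===== SOURCE A (Python) =====
-- def count(pred_entities, gold_entities, label):
--     assert label, "Label is invalid"
--
--     # Remove duplicates
--     pred_entities = {e: True for e in pred_entities}
--     gold_entities = {e: True for e in gold_entities}
--
--     positions = {**pred_entities, **gold_entities}
--
--     padded_pred_entities, padded_gold_entities = [], []
--
--     for k in positions:
--         if k in pred_entities and k[-1] == label:
--             padded_pred_entities.append(k[-1])
--         else:
--             padded_pred_entities.append(None)
--
--         if k in gold_entities and k[-1] == label:
--             padded_gold_entities.append(k[-1])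
--         else:
--             padded_gold_entities.append(None)
--
--     matches = list(zip(padded_pred_entities, padded_gold_entities))
--
--     return {
--         "tp": matches.count((label, label)),
--         "tn": matches.count((None, None)),
--         "fp": matches.count((label, None)),
--         "fn": matches.count((None, label)),
--     }
-- ===== SOURCE B (Python) =====
-- def count(pred_entities, gold_entities, label):
--     assert label, "Label is invalid"
--
--     tp = tn = fp = fn = 0
--     for k in dict.fromkeys(pred_entities + gold_entities):
--         p = k in pred_entities and k[-1] == label
--         g = k in gold_entities and k[-1] == label
--         if p and g:
--             tp += 1
--         elif p:
--             fp += 1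
--         elif g:
--             fn += 1
--         else:
--             tn += 1
--     return {"tp": tp, "tn": tn, "fp": fp, "fn": fn}
-- ===== Notes on version B (the rewrite author's own statement) =====
-- stated objective: simpler
-- what changed: Replaces the two dedup dicts, the padded None-lists, the zip and the four .count scans with a single pass over the deduplicated union that classifies each key into one of four counters.
import Mathlib
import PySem

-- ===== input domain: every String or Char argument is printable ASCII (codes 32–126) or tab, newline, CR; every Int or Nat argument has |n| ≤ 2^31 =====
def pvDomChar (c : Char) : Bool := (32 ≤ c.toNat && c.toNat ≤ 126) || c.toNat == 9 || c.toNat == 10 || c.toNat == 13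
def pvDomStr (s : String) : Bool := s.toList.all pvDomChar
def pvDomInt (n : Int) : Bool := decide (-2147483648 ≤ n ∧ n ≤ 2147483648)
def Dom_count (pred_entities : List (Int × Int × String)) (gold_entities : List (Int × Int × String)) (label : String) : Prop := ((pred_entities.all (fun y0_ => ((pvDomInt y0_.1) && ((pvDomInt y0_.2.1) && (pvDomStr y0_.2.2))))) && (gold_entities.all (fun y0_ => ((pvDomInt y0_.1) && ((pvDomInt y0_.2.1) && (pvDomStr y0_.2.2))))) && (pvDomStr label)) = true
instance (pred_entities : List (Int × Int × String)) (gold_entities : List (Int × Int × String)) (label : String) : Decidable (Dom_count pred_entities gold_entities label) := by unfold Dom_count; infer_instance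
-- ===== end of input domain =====

-- B replaces the dedup dicts, padded None-lists, zip and four .count scans with one
-- classifying pass over the deduplicated union that maintains four counters (simpler).

-- ===== PORT A =====
def count (pred_entities : List (Int × Int × String)) (gold_entities : List (Int × Int × String)) (label : String) : List (String × Int) :=
  -- assert label: Pre_count requires label ≠ ""
  let predD : PySem.Dict (Int × Int × String) Bool :=
    pred_entities.foldl (fun d e => d.insert e true) PySem.Dict.empty
  let goldD : PySem.Dict (Int × Int × String) Bool :=
    gold_entities.foldl (fun d e => d.insert e true) PySem.Dict.empty
  let positions : PySem.Dict (Int × Int × String) Bool :=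
    goldD.items.foldl (fun d kv => d.insert kv.1 kv.2) predD
  let padded :=
    positions.keys.foldl
      (fun (pr : List (Option String) × List (Option String)) k =>
        (pr.1 ++ [if predD.contains k && (k.2.2 == label) then some k.2.2 else none],
         pr.2 ++ [if goldD.contains k && (k.2.2 == label) then some k.2.2 else none]))
      ([], [])
  let matched := padded.1.zip padded.2
  [("tp", (matched.count (some label, some label) : Int)),
   ("tn", (matched.count (none, none) : Int)),
   ("fp", (matched.count (some label, none) : Int)),
   ("fn", (matched.count (none, some label) : Int))]

-- ===== PORT B =====
def count_alt (pred_entities : List (Int × Int × String)) (gold_entities : List (Int × Int × String)) (label : String) : List (String × Int) :=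
  -- assert label: Pre_count requires label ≠ ""
  let c :=
    (PySem.List.dedup (pred_entities ++ gold_entities)).foldl
      (fun (c : Int × Int × Int × Int) k =>
        let p := pred_entities.contains k && (k.2.2 == label)
        let g := gold_entities.contains k && (k.2.2 == label)
        if p && g then (c.1 + 1, c.2.1, c.2.2.1, c.2.2.2)
        else if p then (c.1, c.2.1, c.2.2.1 + 1, c.2.2.2)
        else if g then (c.1, c.2.1, c.2.2.1, c.2.2.2 + 1)
        else (c.1, c.2.1 + 1, c.2.2.1, c.2.2.2))
      (0, 0, 0, 0)
  [("tp", c.1), ("tn", c.2.1), ("fp", c.2.2.1), ("fn", c.2.2.2)]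

-- ===== PRECONDITION & SPEC =====
-- Pre_count excludes only label = "", on which A's `assert label` raises AssertionError.
def Pre_count (pred_entities : List (Int × Int × String)) (gold_entities : List (Int × Int × String)) (label : String) : Prop := label ≠ ""
instance (pred_entities : List (Int × Int × String)) (gold_entities : List (Int × Int × String)) (label : String) : Decidable (Pre_count pred_entities gold_entities label) := by unfold Pre_count; infer_instance
def pvWitness_count : (List (Int × Int × String)) × (List (Int × Int × String)) × String := ([(1, 2, "A"), (3, 4, "B")], [(1, 2, "A"), (5, 6, "A")], "A")
def Spec_count (pred_entities : List (Int × Int × String)) (gold_entities : List (Int × Int × String)) (label : String) (out : List (String × Int)) : Prop := out = count_alt pred_entities gold_entities label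
instance (pred_entities : List (Int × Int × String)) (gold_entities : List (Int × Int × String)) (label : String) (out : List (String × Int)) : Decidable (Spec_count pred_entities gold_entities label out) := by unfold Spec_count; infer_instance

-- ===== CLAIM (what is proved, stated in full; the proofs are below) =====
def Claim_equal_count : Prop := ∀ (pred_entities : List (Int × Int × String)) (gold_entities : List (Int × Int × String)) (label : String), Dom_count pred_entities gold_entities label → Pre_count pred_entities gold_entities label → Spec_count pred_entities gold_entities label (count pred_entities gold_entities label)

-- ===== LEMMAS AND PROOFS =====

-- A's padded-list loop builds two mapped lists.
theorem pv_pairfold {α β γ : Type} (f : α → β) (g : α → γ) :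
    ∀ (ks : List α) (as_ : List β) (bs : List γ),
      ks.foldl (fun pr k => (pr.1 ++ [f k], pr.2 ++ [g k])) (as_, bs)
        = (as_ ++ ks.map f, bs ++ ks.map g) := by
  intro ks
  induction ks with
  | nil => simp
  | cons k ks ih => intro as_ bs; simp [List.foldl_cons, ih]

-- B's four-counter loop counts each class with countP.
theorem pv_fold4 {α : Type} (P G : α → Bool) :
    ∀ (ks : List α) (tp tn fp fn : Int),
      ks.foldl
        (fun (c : Int × Int × Int × Int) k =>
          if P k && G k then (c.1 + 1, c.2.1, c.2.2.1, c.2.2.2)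
          else if P k then (c.1, c.2.1, c.2.2.1 + 1, c.2.2.2)
          else if G k then (c.1, c.2.1, c.2.2.1, c.2.2.2 + 1)
          else (c.1, c.2.1 + 1, c.2.2.1, c.2.2.2))
        (tp, tn, fp, fn)
      = (tp + (ks.countP (fun k => P k && G k) : Int),
         tn + (ks.countP (fun k => !P k && !G k) : Int),
         fp + (ks.countP (fun k => P k && !G k) : Int),
         fn + (ks.countP (fun k => !P k && G k) : Int)) := by
  intro ks
  induction ks with
  | nil => intro tp tn fp fn; simp
  | cons k ks ih =>
    intro tp tn fp fn
    rw [List.foldl_cons]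
    by_cases hP : P k = true <;> by_cases hG : G k = true <;>
      [skip; skip; skip; skip] <;>
      · simp only [hP, hG, Bool.true_and, Bool.false_and, Bool.and_self, if_true, if_false,
          Bool.false_eq_true, ite_true, ite_false]
        rw [ih]
        simp [List.countP_cons, hP, hG, Prod.ext_iff]
        push_cast
        omega

theorem pv_count_eq (p g : List (Int × Int × String)) (lab : String) :
    count p g lab = count_alt p g lab := by
  simp only [count, count_alt]
  have hpk : (p.foldl (fun d e => d.insert e true) PySem.Dict.empty).keys = PySem.Set.ofList p := by
    rw [PySem.Dict.keys_foldl_insert]; simp [PySem.Set.update_nil_left]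
  have hgk : (g.foldl (fun d e => d.insert e true) PySem.Dict.empty).keys = PySem.Set.ofList g := by
    rw [PySem.Dict.keys_foldl_insert]; simp [PySem.Set.update_nil_left]
  have hkeys :
      ((g.foldl (fun d e => d.insert e true) PySem.Dict.empty).items.foldl
          (fun d kv => d.insert kv.1 kv.2)
          (p.foldl (fun d e => d.insert e true) PySem.Dict.empty)).keys
        = PySem.List.dedup (p ++ g) := by
    rw [PySem.Dict.keys_foldl_insert_key]
    show PySem.Set.update _ ((g.foldl (fun d e => d.insert e true) PySem.Dict.empty).keys) = _
    rw [hpk, hgk, PySem.List.dedup_eq_ofList, PySem.Set.ofList_append,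
      PySem.Set.update_eq_append_filter, PySem.Set.update_eq_append_filter, PySem.Set.ofList_ofList]
  have hpc : ∀ k : Int × Int × String,
      (p.foldl (fun d e => d.insert e true) PySem.Dict.empty).contains k = p.contains k := by
    intro k
    rw [PySem.Dict.contains_eq_decide_mem_keys, hpk, List.contains_eq_mem]
    simp [PySem.Set.mem_ofList]
  have hgc : ∀ k : Int × Int × String,
      (g.foldl (fun d e => d.insert e true) PySem.Dict.empty).contains k = g.contains k := by
    intro k
    rw [PySem.Dict.contains_eq_decide_mem_keys, hgk, List.contains_eq_mem]
    simp [PySem.Set.mem_ofList]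
  rw [hkeys, pv_pairfold]
  simp only [List.nil_append, hpc, hgc]
  rw [List.zip_map']
  rw [pv_fold4 (fun k : Int × Int × String => p.contains k && (k.2.2 == lab))
      (fun k : Int × Int × String => g.contains k && (k.2.2 == lab))
      (PySem.List.dedup (p ++ g)) 0 0 0 0]
  simp only [zero_add]
  rw [List.count_eq_countP, List.count_eq_countP, List.count_eq_countP, List.count_eq_countP,
    List.countP_map, List.countP_map, List.countP_map, List.countP_map]
  simp only [List.cons.injEq, Prod.mk.injEq, Nat.cast_inj, true_and, and_true]
  refine ⟨?_, ?_, ?_, ?_⟩ <;>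
    [skip; skip; skip; skip] <;>
    · apply List.countP_congr
      intro k _
      by_cases hp : p.contains k = true <;> by_cases hg : g.contains k = true <;>
        by_cases hl : k.2.2 = lab <;>
        simp [hp, hg, hl, Function.comp]

-- ===== VERDICT (by name: the statement is the Claim_ definition above) =====
theorem count_spec : Claim_equal_count := by
  intro p g lab _ _
  unfold Spec_count
  exact pv_count_eq p g lab
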